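-- pv_equiv track=rewrite | github.com/weishao-yu/data_structure | WEEK 7/work3.py | solve
-- ===== SOURCE A (Python) =====
-- def solve(point):
--     for i in range(4):
--         for j in range(i + 1, 4):
--             if point[i] == point[j]:
--                 common = point[i]
--                 others = [p for k, p in enumerate(point) if k != i and k != j]
--                 dx = others[0][0] - common[0]
--                 dy = others[0][1] - common[1]
--                 another = (others[1][0] + dx, others[1][1] + dy)
--                 return another
-- ===== SOURCE B (Python) =====
-- def solve(point):
--     p0, p1, p2, p3 = point[:4]      # the four vertices
--     quad = [p0, p1, p2, p3]
--     counts = {}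
--     for p in quad:
--         counts[p] = counts.get(p, 0) + 1
--     sx = p0[0] + p1[0] + p2[0] + p3[0]
--     sy = p0[1] + p1[1] + p2[1] + p3[1]
--     for p in quad:
--         if counts[p] >= 2:
--             return (sx - 3 * p[0], sy - 3 * p[1])
--     return None
-- ===== Notes on version B (the rewrite author's own statement) =====
-- stated objective: alternative
-- what changed: B replaces A's index-pair double loop with enumerate-filter partition and displacement-vector arithmetic by unpacking the four vertices, a counting-dict pass (the shared vertex is the first point whose multiplicity is >= 2) and the closed-form answer (sum_x - 3*common_x, sum_y - 3*common_y); Pre_ excludes lists shorter than 4, on which A raises IndexError and B raises ValueError unpacking.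
import Mathlib
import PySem

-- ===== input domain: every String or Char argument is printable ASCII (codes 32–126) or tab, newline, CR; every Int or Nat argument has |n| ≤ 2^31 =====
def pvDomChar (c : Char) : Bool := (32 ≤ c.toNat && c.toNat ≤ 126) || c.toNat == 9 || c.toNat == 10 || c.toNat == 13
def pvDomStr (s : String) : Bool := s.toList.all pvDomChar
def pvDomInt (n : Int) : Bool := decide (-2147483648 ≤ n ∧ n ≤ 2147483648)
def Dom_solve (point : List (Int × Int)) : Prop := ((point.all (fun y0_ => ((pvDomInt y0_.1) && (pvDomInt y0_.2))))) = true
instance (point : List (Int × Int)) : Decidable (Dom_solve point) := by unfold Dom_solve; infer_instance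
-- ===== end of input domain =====

-- B finds the shared vertex by a counting dict over point[:4] (first point with multiplicity
-- >= 2) and returns the closed form (sum_x - 3*common_x, sum_y - 3*common_y); return value only.

-- ===== PORT A =====
-- the comprehension '[p for k,p in enumerate(point) if k != i and k != j]'
def keepOthers (i j : Nat) : Nat → List (Int × Int) → List (Int × Int)
  | _, [] => []
  | k, p :: rest =>
      if k ≠ i ∧ k ≠ j then p :: keepOthers i j (k + 1) rest
      else keepOthers i j (k + 1) rest

-- the body of the 'if point[i] == point[j]' branch (indices in range under Pre_)
def solveFound (point : List (Int × Int)) (i j : Nat) : Option (Int × Int) :=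
  let common := point.getD i (0, 0)
  let others := keepOthers i j 0 point
  let dx := (others.getD 0 (0, 0)).1 - common.1
  let dy := (others.getD 0 (0, 0)).2 - common.2
  some ((others.getD 1 (0, 0)).1 + dx, (others.getD 1 (0, 0)).2 + dy)

-- 'for i in range(4): for j in range(i+1,4):' flattened into its pair sequence
def solveLoop (point : List (Int × Int)) : List (Nat × Nat) → Option (Int × Int)
  | [] => none
  | (i, j) :: rest =>
      if point.getD i (0, 0) = point.getD j (0, 0) then solveFound point i j
      else solveLoop point rest

def solve (point : List (Int × Int)) : Option (Int × Int) :=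
  solveLoop point [(0, 1), (0, 2), (0, 3), (1, 2), (1, 3), (2, 3)]

-- ===== PORT B =====
-- B's second loop: return the first p of quad with counts[p] >= 2 (p is always a key of counts)
def findCommon (counts : PySem.Dict (Int × Int) Int) : List (Int × Int) → Option (Int × Int)
  | [] => none
  | p :: rest => if 2 ≤ counts.getD p 0 then some p else findCommon counts rest

def solve_alt (point : List (Int × Int)) : Option (Int × Int) :=
  match PySem.List.slice point none (some 4) with
  | [p0, p1, p2, p3] =>
      let quad := [p0, p1, p2, p3]
      let counts := quad.foldl
        (fun d p => PySem.Dict.insert d p (PySem.Dict.getD d p 0 + 1)) PySem.Dict.empty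
      let sx := p0.1 + p1.1 + p2.1 + p3.1
      let sy := p0.2 + p1.2 + p2.2 + p3.2
      match findCommon counts quad with
      | some p => some (sx - 3 * p.1, sy - 3 * p.2)
      | none => none
  | _ => none   -- 'p0, p1, p2, p3 = point[:4]' raises ValueError here (outside Pre_)

-- ===== PRECONDITION & SPEC =====
-- Pre_ excludes lists shorter than 4, on which A always raises IndexError.
def Pre_solve (point : List (Int × Int)) : Prop := 4 ≤ point.length
instance (point : List (Int × Int)) : Decidable (Pre_solve point) := by unfold Pre_solve; infer_instance
def pvWitness_solve : (List (Int × Int)) := [(0, 0), (2, 0), (0, 0), (1, 3)]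

def Spec_solve (point : List (Int × Int)) (out : Option (Int × Int)) : Prop := out = solve_alt point
instance (point : List (Int × Int)) (out : Option (Int × Int)) : Decidable (Spec_solve point out) := by unfold Spec_solve; infer_instance

-- ===== CLAIM (what is proved, stated in full; the proofs are below) =====
def Claim_equal_solve : Prop := ∀ (point : List (Int × Int)), Dom_solve point → Pre_solve point → Spec_solve point (solve point)

-- ===== LEMMAS AND PROOFS =====
theorem keepOthers_high (i j : Nat) (l : List (Int × Int)) :
    ∀ k, i < k → j < k → keepOthers i j k l = l := by
  induction l with
  | nil => intro k _ _; rfl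
  | cons p rest ih =>
      intro k hi hj
      simp only [keepOthers]
      rw [ih (k + 1) (by omega) (by omega), if_pos ⟨by omega, by omega⟩]

-- ===== VERDICT (by name: the statement is the Claim_ definition above) =====
set_option maxRecDepth 4096 in
theorem solve_spec : Claim_equal_solve := by
  intro point _ hpre
  obtain ⟨a, b, c, d, t, rfl⟩ :
      ∃ a b c d t, point = a :: b :: c :: d :: t := by
    match point, hpre with
    | a :: b :: c :: d :: t, _ => exact ⟨a, b, c, d, t, rfl⟩
  unfold Spec_solve
  have hk := keepOthers_high
  by_cases h1 : a = b
  · subst h1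
    simp [solve, solve_alt, solveLoop, solveFound, findCommon, keepOthers, PySem.Dict.getD_insert, PySem.Dict.getD_empty, PySem.List.slice_to, hk 0 1 t 4 (by omega) (by omega)]
    first | (exact ⟨by ring, by ring⟩) | (split_ifs <;> first | omega | (subst_vars; first | (exact absurd rfl (by assumption)) | (simp only [Option.some.injEq, Prod.mk.injEq]; exact ⟨by ring, by ring⟩)))
  · by_cases h2 : a = c
    · subst h2
      simp [solve, solve_alt, solveLoop, solveFound, findCommon, keepOthers, PySem.Dict.getD_insert, PySem.Dict.getD_empty, PySem.List.slice_to, h1, Ne.symm h1, hk 0 2 t 4 (by omega) (by omega)]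
      first | (exact ⟨by ring, by ring⟩) | (split_ifs <;> first | omega | (subst_vars; first | (exact absurd rfl (by assumption)) | (simp only [Option.some.injEq, Prod.mk.injEq]; exact ⟨by ring, by ring⟩)))
    · by_cases h3 : a = d
      · subst h3
        simp [solve, solve_alt, solveLoop, solveFound, findCommon, keepOthers, PySem.Dict.getD_insert, PySem.Dict.getD_empty, PySem.List.slice_to, h1, h2, Ne.symm h1, Ne.symm h2, hk 0 3 t 4 (by omega) (by omega)]
        first | (exact ⟨by ring, by ring⟩) | (split_ifs <;> first | omega | (subst_vars; first | (exact absurd rfl (by assumption)) | (simp only [Option.some.injEq, Prod.mk.injEq]; exact ⟨by ring, by ring⟩)))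
      · by_cases h4 : b = c
        · subst h4
          simp [solve, solve_alt, solveLoop, solveFound, findCommon, keepOthers, PySem.Dict.getD_insert, PySem.Dict.getD_empty, PySem.List.slice_to, h1, h3, Ne.symm h1, Ne.symm h3, hk 1 2 t 4 (by omega) (by omega)]
          first | (exact ⟨by ring, by ring⟩) | (split_ifs <;> first | omega | (subst_vars; first | (exact absurd rfl (by assumption)) | (simp only [Option.some.injEq, Prod.mk.injEq]; exact ⟨by ring, by ring⟩)))
        · by_cases h5 : b = d
          · subst h5
            simp [solve, solve_alt, solveLoop, solveFound, findCommon, keepOthers, PySem.Dict.getD_insert, PySem.Dict.getD_empty, PySem.List.slice_to, h1, h2, h4, Ne.symm h1, Ne.symm h2, Ne.symm h4, hk 1 3 t 4 (by omega) (by omega)]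
            first | (exact ⟨by ring, by ring⟩) | (split_ifs <;> first | omega | (subst_vars; first | (exact absurd rfl (by assumption)) | (simp only [Option.some.injEq, Prod.mk.injEq]; exact ⟨by ring, by ring⟩)))
          · by_cases h6 : c = d
            · subst h6
              simp [solve, solve_alt, solveLoop, solveFound, findCommon, keepOthers, PySem.Dict.getD_insert, PySem.Dict.getD_empty, PySem.List.slice_to, h1, h2, h4, Ne.symm h1, Ne.symm h2, Ne.symm h4, hk 2 3 t 4 (by omega) (by omega)]
              first | (exact ⟨by ring, by ring⟩) | (split_ifs <;> first | omega | (subst_vars; first | (exact absurd rfl (by assumption)) | (simp only [Option.some.injEq, Prod.mk.injEq]; exact ⟨by ring, by ring⟩)))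
            · simp [solve, solve_alt, solveLoop, findCommon, PySem.Dict.getD_insert, PySem.Dict.getD_empty, PySem.List.slice_to, h1, h2, h3, h4, h5, h6, Ne.symm h1, Ne.symm h2, Ne.symm h3, Ne.symm h4, Ne.symm h5, Ne.symm h6]
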